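-- pv_equiv track=rewrite | github.com/cybersecuritytools/easyrecon | easyrecon/utils/merger.py | _is_noise_url
-- ===== SOURCE A (Python) =====
-- def _is_noise_url(url: str) -> bool:
--     """Check if URL is noise (static assets we don't care about)."""
--     noise_extensions = (
--         ".png", ".jpg", ".jpeg", ".gif", ".svg", ".ico",
--         ".css", ".woff", ".woff2", ".ttf", ".eot",
--         ".mp4", ".mp3", ".wav", ".avi", ".mov",
--         ".pdf", ".doc", ".docx",
--     )
--     url_lower = url.lower().split("?")[0]
--     return any(url_lower.endswith(ext) for ext in noise_extensions)
-- ===== SOURCE B (Python) =====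
-- NOISE_SET = {
--     "png", "jpg", "jpeg", "gif", "svg", "ico",
--     "css", "woff", "woff2", "ttf", "eot",
--     "mp4", "mp3", "wav", "avi", "mov",
--     "pdf", "doc", "docx",
-- }
--
--
-- def _is_noise_url(url: str) -> bool:
--     """Check if URL is noise (static assets we don't care about)."""
--     # One left-to-right scan: lowercase each char on the fly, stop at the first
--     # '?', restart the extension accumulator at every '.'; then one set lookup.
--     ext = None  # chars seen since the last '.', or None if no '.' yet
--     for ch in url:
--         c = ch.lower()
--         if c == "?":
--             break
--         if c == ".":
--             ext = []
--         elif ext is not None: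
--             ext.append(c)
--     return ext is not None and "".join(ext) in NOISE_SET
-- ===== Notes on version B (the rewrite author's own statement) =====
-- stated objective: alternative
-- what changed: B replaces A's lower-then-split-then-19-endswith-checks pipeline with a single left-to-right character scan that lowercases on the fly, stops at the first question mark, restarts an extension accumulator at each dot, and finishes with one set-membership test.
import Mathlib
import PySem

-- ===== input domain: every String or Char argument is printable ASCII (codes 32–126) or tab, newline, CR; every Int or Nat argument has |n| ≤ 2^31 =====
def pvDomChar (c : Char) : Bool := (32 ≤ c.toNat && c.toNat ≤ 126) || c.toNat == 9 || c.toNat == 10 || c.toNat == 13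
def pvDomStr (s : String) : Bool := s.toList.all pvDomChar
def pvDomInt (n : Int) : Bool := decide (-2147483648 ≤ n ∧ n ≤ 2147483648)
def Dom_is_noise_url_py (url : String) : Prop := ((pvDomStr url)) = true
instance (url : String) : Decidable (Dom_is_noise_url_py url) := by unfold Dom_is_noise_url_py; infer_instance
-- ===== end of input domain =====

-- B replaces A's lower/split/19-endswith pipeline with one left-to-right scan that
-- lowercases on the fly, stops at '?', restarts an extension accumulator at each '.',
-- then does a single set-membership test (objective: alternative).

-- ===== PORT A =====
def pvNoiseExts : List (List Char) :=
  [".png".toList, ".jpg".toList, ".jpeg".toList, ".gif".toList, ".svg".toList, ".ico".toList,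
   ".css".toList, ".woff".toList, ".woff2".toList, ".ttf".toList, ".eot".toList,
   ".mp4".toList, ".mp3".toList, ".wav".toList, ".avi".toList, ".mov".toList,
   ".pdf".toList, ".doc".toList, ".docx".toList]

def is_noise_url_py (url : String) : Bool :=
  -- url.lower().split("?")[0]; split(sep) is never empty, so [0] is headD
  let url_lower := (PySem.Chars.splitOn (PySem.Chars.lower url.toList) ['?']).headD []
  pvNoiseExts.any (fun ext => PySem.Chars.endswith url_lower ext)

-- ===== PORT B =====
def pvNoiseSet : PySem.Set (List Char) :=
  PySem.Set.ofList
    ["png".toList, "jpg".toList, "jpeg".toList, "gif".toList, "svg".toList, "ico".toList,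
     "css".toList, "woff".toList, "woff2".toList, "ttf".toList, "eot".toList,
     "mp4".toList, "mp3".toList, "wav".toList, "avi".toList, "mov".toList,
     "pdf".toList, "doc".toList, "docx".toList]

-- Source B's for-loop over the characters: state 'ext' is None until a '.' is seen,
-- reset to [] at each '.', extended by every ordinary char; 'break' on '?'
def pvScanExt : List Char → Option (List Char) → Option (List Char)
  | [], ext => ext
  | ch :: rest, ext =>
    let c := PySem.Chars.lowerChar ch
    if c = '?' then ext
    else if c = '.' then pvScanExt rest (some [])
    else pvScanExt rest (Option.map (· ++ [c]) ext)

def is_noise_url_py_alt (url : String) : Bool :=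
  match pvScanExt url.toList none with
  | none => false                                 -- ext is None: no '.' before the first '?'
  | some ext => PySem.Set.contains pvNoiseSet ext -- ''.join(ext) in NOISE_SET

-- ===== PRECONDITION & SPEC =====
def Spec_is_noise_url_py (url : String) (out : Bool) : Prop := out = is_noise_url_py_alt url
instance (url : String) (out : Bool) : Decidable (Spec_is_noise_url_py url out) := by unfold Spec_is_noise_url_py; infer_instance

-- ===== CLAIM (what is proved, stated in full; the proofs are below) =====
def Claim_equal_is_noise_url_py : Prop := ∀ (url : String), Dom_is_noise_url_py url → Spec_is_noise_url_py url (is_noise_url_py url)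

-- ===== LEMMAS AND PROOFS =====

-- proof-side characterisation: the chars after the LAST '.', none when there is no '.'
def pvExtAfterLastDot : List Char → Option (List Char)
  | [] => none
  | c :: rest =>
    match pvExtAfterLastDot rest with
    | some e => some e
    | none => if c = '.' then some rest else none

theorem pvExt_none_of_no_dot : ∀ {cs : List Char}, '.' ∉ cs → pvExtAfterLastDot cs = none := by
  intro cs h
  induction cs with
  | nil => rfl
  | cons c rest ih =>
    simp only [List.mem_cons, not_or] at h
    have hc : ¬ c = '.' := fun hc => h.1 hc.symm
    simp [pvExtAfterLastDot, ih h.2, hc]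

theorem pvExt_some_iff (e : List Char) (he : '.' ∉ e) :
    ∀ (cs : List Char), pvExtAfterLastDot cs = some e ↔ ('.' :: e) <:+ cs := by
  intro cs
  induction cs with
  | nil => simp [pvExtAfterLastDot]
  | cons c rest ih =>
    rw [List.suffix_cons_iff]
    constructor
    · intro h
      cases hr : pvExtAfterLastDot rest with
      | some e' =>
        simp only [pvExtAfterLastDot, hr] at h
        exact Or.inr (ih.mp (hr.trans h))
      | none =>
        simp only [pvExtAfterLastDot, hr] at h
        by_cases hc : c = '.'
        · simp [hc] at h; exact Or.inl (by rw [hc, h])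
        · simp [hc] at h
    · intro h
      cases h with
      | inl h =>
        injection h with h1 h2
        subst h1; subst h2
        have hn : pvExtAfterLastDot e = none := pvExt_none_of_no_dot he
        simp [pvExtAfterLastDot, hn]
      | inr h =>
        simp [pvExtAfterLastDot, ih.mpr h]

theorem pvEndswith_eq (cs e : List Char) (he : '.' ∉ e) :
    PySem.Chars.endswith cs ('.' :: e) = decide (pvExtAfterLastDot cs = some e) := by
  rcases h : PySem.Chars.endswith cs ('.' :: e) with _ | _
  · have : ¬ ('.' :: e) <:+ cs := fun hs => by
      rw [(PySem.Chars.endswith_iff cs ('.' :: e)).mpr hs] at h; cases h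
    simp [(pvExt_some_iff e he cs), this]
  · have := (PySem.Chars.endswith_iff cs ('.' :: e)).mp h
    simp [(pvExt_some_iff e he cs), this]

-- A's any-endswith scan computes exactly 'extension after the last dot ∈ set'
theorem pvMain (cs : List Char) :
    pvNoiseExts.any (fun ext => PySem.Chars.endswith cs ext) =
      (match pvExtAfterLastDot cs with
       | none => false
       | some ext => PySem.Set.contains pvNoiseSet ext) := by
  have h1 : pvNoiseExts.any (fun ext => PySem.Chars.endswith cs ext) =
      (pvNoiseSet : List (List Char)).any (fun e => decide (pvExtAfterLastDot cs = some e)) := by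
    have hmap : pvNoiseExts = (pvNoiseSet : List (List Char)).map (fun e => '.' :: e) := by decide
    rw [hmap, List.any_map]
    apply PySem.List.any_congr_mem
    intro e hmem
    have he : '.' ∉ e := by fin_cases hmem <;> decide
    exact pvEndswith_eq cs e he
  rw [h1]
  cases h : pvExtAfterLastDot cs with
  | none => simp
  | some x =>
    show (List.any pvNoiseSet fun e => decide (some x = some e)) = PySem.Set.contains pvNoiseSet x
    by_cases hx : x ∈ (pvNoiseSet : List (List Char))
    · have hc : PySem.Set.contains pvNoiseSet x = true := by
        simp [PySem.Set.contains, hx]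
      rw [hc, List.any_eq_true]
      exact ⟨x, hx, by simp⟩
    · have hc : PySem.Set.contains pvNoiseSet x = false := by
        simp [PySem.Set.contains, hx]
      rw [hc, List.any_eq_false]
      intro e hmem
      simp only [Option.some.injEq, decide_eq_true_eq]
      intro hxe
      exact hx (hxe ▸ hmem)

-- the '?'-test as a named predicate (keeps simp from re-normalising it under takeWhile)
def pvNotQ (x : Char) : Bool := x ≠ '?'

-- splitOn.go ignores the already-collected pieces acc except for prepending them
theorem pvGo_decomp (sep : List Char) : ∀ (fuel : Nat) (l cur : List Char) (acc : List (List Char)),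
    PySem.Chars.splitOn.go sep fuel l cur acc =
      acc.reverse ++ PySem.Chars.splitOn.go sep fuel l cur [] := by
  intro fuel
  induction fuel with
  | zero => intro l cur acc; simp [PySem.Chars.splitOn.go]
  | succ fuel ih =>
    intro l cur acc
    cases l with
    | nil => simp [PySem.Chars.splitOn.go]
    | cons c rest =>
      simp only [PySem.Chars.splitOn.go]
      split
      · rw [ih _ _ (cur.reverse :: acc), ih _ _ [cur.reverse]]
        simp
      · exact ih _ _ acc

-- head of splitOn on '?' is the part before the first '?'
theorem pvGo_head : ∀ (fuel : Nat) (l cur : List Char), l.length ≤ fuel →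
    (PySem.Chars.splitOn.go ['?'] fuel l cur []).headD [] =
      cur.reverse ++ l.takeWhile pvNotQ := by
  intro fuel
  induction fuel with
  | zero =>
    intro l cur h
    have : l = [] := List.eq_nil_of_length_eq_zero (Nat.le_zero.mp h)
    subst this
    simp [PySem.Chars.splitOn.go]
  | succ fuel ih =>
    intro l cur h
    cases l with
    | nil => simp [PySem.Chars.splitOn.go]
    | cons c rest =>
      simp only [PySem.Chars.splitOn.go]
      by_cases hc : c = '?'
      · subst hc
        have hpre : List.isPrefixOf ['?'] ('?' :: rest) = true := by
          simp [List.isPrefixOf]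
        rw [if_pos hpre, pvGo_decomp]
        simp [List.takeWhile, pvNotQ]
      · have hpre : List.isPrefixOf ['?'] (c :: rest) = false := by
          simp only [List.isPrefixOf, Bool.and_true]
          exact decide_eq_false (fun h => hc (Eq.symm h))
        rw [if_neg (by simp [hpre])]
        rw [ih rest (c :: cur) (by simpa using Nat.le_of_succ_le_succ h)]
        simp [List.takeWhile, pvNotQ, hc]

theorem pvSplit_head (s : List Char) :
    (PySem.Chars.splitOn s ['?']).headD [] = s.takeWhile pvNotQ := by
  unfold PySem.Chars.splitOn
  simpa using pvGo_head (s.length + 1) s [] (Nat.le_succ _)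

-- B's scan equals 'extension after last dot' of the lowered, '?'-truncated string
theorem pvScan_eq : ∀ (cs : List Char) (ext : Option (List Char)),
    pvScanExt cs ext =
      (match pvExtAfterLastDot ((PySem.Chars.lower cs).takeWhile pvNotQ) with
       | some e => some e
       | none => Option.map (· ++ (PySem.Chars.lower cs).takeWhile pvNotQ) ext) := by
  intro cs
  induction cs with
  | nil =>
    intro ext
    cases ext <;> simp [pvScanExt, PySem.Chars.lower, pvExtAfterLastDot]
  | cons ch rest ih =>
    intro ext
    have hlow : PySem.Chars.lower (ch :: rest) = PySem.Chars.lowerChar ch :: PySem.Chars.lower rest := rfl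
    rw [hlow]
    by_cases hq : PySem.Chars.lowerChar ch = '?'
    · have hL : pvScanExt (ch :: rest) ext = ext := by simp [pvScanExt, hq]
      have htw : (PySem.Chars.lowerChar ch :: PySem.Chars.lower rest).takeWhile pvNotQ = ([] : List Char) := by
        simp [List.takeWhile, pvNotQ, hq]
      rw [hL, htw]
      cases ext <;> simp [pvExtAfterLastDot]
    · have htw : (PySem.Chars.lowerChar ch :: PySem.Chars.lower rest).takeWhile pvNotQ =
          PySem.Chars.lowerChar ch :: (PySem.Chars.lower rest).takeWhile pvNotQ := by
        simp [List.takeWhile, pvNotQ, hq]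
      rw [htw]
      by_cases hd : PySem.Chars.lowerChar ch = '.'
      · have hL : pvScanExt (ch :: rest) ext = pvScanExt rest (some []) := by
          simp [pvScanExt, hd]
        rw [hL, ih (some [])]
        cases hr : pvExtAfterLastDot ((PySem.Chars.lower rest).takeWhile pvNotQ) with
        | some e => simp [pvExtAfterLastDot, hr]
        | none => simp [pvExtAfterLastDot, hr, hd]
      · have hL : pvScanExt (ch :: rest) ext = pvScanExt rest (Option.map (· ++ [PySem.Chars.lowerChar ch]) ext) := by
          simp [pvScanExt, hq, hd]
        rw [hL, ih (Option.map (· ++ [PySem.Chars.lowerChar ch]) ext)]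
        cases hr : pvExtAfterLastDot ((PySem.Chars.lower rest).takeWhile pvNotQ) with
        | some e => simp [pvExtAfterLastDot, hr]
        | none =>
          simp only [pvExtAfterLastDot, hr, if_neg hd]
          cases ext <;> simp

-- ===== VERDICT (by name: the statement is the Claim_ definition above) =====
theorem is_noise_url_py_spec : Claim_equal_is_noise_url_py := by
  intro url _
  unfold Spec_is_noise_url_py is_noise_url_py is_noise_url_py_alt
  rw [pvMain, pvSplit_head, pvScan_eq url.toList none]
  cases pvExtAfterLastDot ((PySem.Chars.lower url.toList).takeWhile pvNotQ) <;> simp
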